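-- pv_equiv track=rewrite | github.com/aalatraqchi/MyCS50 | CS50 Assignments Source Codes/CreditPy/credit.py | cardType
-- ===== SOURCE A (Python) =====
-- def luhn(n):
--
--     # Define varialbles: last digit, second to last digit, first and second sums, individual digits for sum one, and total
--     m1 = 0
--     m2 = 0
--     sum1 = 0
--     sum2 = 0
--     d1 = 0
--     d2 = 0
--     total = 0
--
--     # Luhn's algorithm by getting last and second to last, applying them to their respective sums, then
--     # shortening the card number and repeat
--     while n > 1:
--         m1 = n % 10  # Get the last digit
--         n //= 10  # Shorten card number
--         sum2 += m1  # Add last digit to sum2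
--
--         m2 = n % 10  # Get the last digit of the new shortened number (second to last digit of the original card number)
--         n //= 10
--         m2 *= 2  # Multiply by 2 then add its 2 individual digits to sum1
--         d2 = m2 % 10
--         d1 = m2 // 10
--         sum1 += d1 + d2
--     total = sum1 + sum2
--     return total
--
-- def cardType(n):
--
--     # Set variables for first and second digits, and the total returned from luhn's
--     fnum = 0
--     snum = 0
--     l = luhn(n)
--
--     # Shorten number until we are left with the first two digits
--     while n > 100:
--         n //= 10
--
--     fnum = n // 10
--     snum = n % 10
--
--     # Determine card type by starting 2 digits
--     if l % 10 == 0 and fnum == 4: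
--         return "VISA"
--     elif l % 10 == 0 and fnum == 5 and (snum > 0 and snum < 6):
--         return "MASTERCARD"
--     elif l % 10 == 0 and fnum == 3 and (snum == 4 or snum == 7):
--         return "AMEX"
--     else:
--         return "INVALID"
-- ===== SOURCE B (Python) =====
-- def cardType(n):
--     # Reject anything with fewer than two digits (covers zero and negatives).
--     if n < 10:
--         return "INVALID"
--     digits = []            # least-significant digit first
--     m = n
--     while m > 0:
--         digits.append(m % 10)
--         m //= 10
--     total = 0
--     double = False
--     for d in digits:
--         total += d * 2 // 10 + d * 2 % 10 if double else d
--         double = not double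
--     if total % 10 != 0:
--         return "INVALID"
--     fnum, snum = digits[-1], digits[-2]
--     if fnum == 4:
--         return "VISA"
--     if fnum == 5 and 0 < snum < 6:
--         return "MASTERCARD"
--     if fnum == 3 and snum in (4, 7):
--         return "AMEX"
--     return "INVALID"
-- ===== Notes on version B (the rewrite author's own statement) =====
-- stated objective: idiomatic
-- what changed: B extracts the digit list once and runs the standard single-pass Luhn fold with an alternating-double flag, reading the card-type digits from the ends of that list, instead of A's pair-consuming while-loop plus a second shortening loop over the number.
import Mathlib
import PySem

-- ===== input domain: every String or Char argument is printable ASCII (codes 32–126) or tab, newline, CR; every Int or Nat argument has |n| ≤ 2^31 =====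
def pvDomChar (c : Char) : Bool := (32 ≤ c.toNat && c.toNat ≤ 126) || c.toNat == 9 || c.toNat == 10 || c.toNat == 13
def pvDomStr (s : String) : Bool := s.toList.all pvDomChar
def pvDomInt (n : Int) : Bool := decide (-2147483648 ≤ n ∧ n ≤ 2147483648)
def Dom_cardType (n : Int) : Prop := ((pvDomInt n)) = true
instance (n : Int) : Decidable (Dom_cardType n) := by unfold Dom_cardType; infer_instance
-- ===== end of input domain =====

-- B replaces A's pair-consuming Luhn while-loop and second shortening loop by the standard
-- single pass over the digit list with an alternating-double flag (idiomatic; same cost).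


-- ===== PORT A =====
-- A's luhn while-loop, with its two running sums as accumulators
def pvLuhnAux (n sum1 sum2 : Int) : Int :=
  if 1 < n then
    let m1 := PySem.Int.mod n 10
    let n1 := PySem.Int.floordiv n 10
    let m2 := PySem.Int.mod n1 10 * 2
    let n2 := PySem.Int.floordiv n1 10
    let d2 := PySem.Int.mod m2 10
    let d1 := PySem.Int.floordiv m2 10
    pvLuhnAux n2 (sum1 + d1 + d2) (sum2 + m1)
  else sum1 + sum2
termination_by n.toNat
decreasing_by
  simp only [PySem.Int.floordiv_eq_ediv_of_pos (by norm_num : (0:Int) < 10)]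
  omega

def pvLuhn (n : Int) : Int := pvLuhnAux n 0 0

-- A's "while n > 100: n //= 10" loop
def pvShorten (n : Int) : Int :=
  if 100 < n then pvShorten (PySem.Int.floordiv n 10) else n
termination_by n.toNat
decreasing_by
  simp only [PySem.Int.floordiv_eq_ediv_of_pos (by norm_num : (0:Int) < 10)]
  omega

def cardType (n : Int) : String :=
  let l := pvLuhn n
  let m := pvShorten n
  let fnum := PySem.Int.floordiv m 10
  let snum := PySem.Int.mod m 10
  if PySem.Int.mod l 10 = 0 ∧ fnum = 4 then "VISA"
  else if PySem.Int.mod l 10 = 0 ∧ fnum = 5 ∧ (0 < snum ∧ snum < 6) then "MASTERCARD"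
  else if PySem.Int.mod l 10 = 0 ∧ fnum = 3 ∧ (snum = 4 ∨ snum = 7) then "AMEX"
  else "INVALID"

-- ===== PORT B =====
-- Source B's "while m > 0: digits.append(m % 10); m //= 10" loop (least-significant digit first)
def pvDigits (m : Int) (acc : List Int) : List Int :=
  if 0 < m then pvDigits (PySem.Int.floordiv m 10) (acc ++ [PySem.Int.mod m 10]) else acc
termination_by m.toNat
decreasing_by
  simp only [PySem.Int.floordiv_eq_ediv_of_pos (by norm_num : (0:Int) < 10)]
  omega

-- Source B's loop body: state (total, double)
def pvLuhnStep (s : Int × Bool) (d : Int) : Int × Bool :=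
  (s.1 + (if s.2 then PySem.Int.floordiv (d * 2) 10 + PySem.Int.mod (d * 2) 10 else d), !s.2)

def cardType_alt (n : Int) : String :=
  if n < 10 then "INVALID"
  else
    let digits := pvDigits n []
    let total := (digits.foldl pvLuhnStep (0, false)).1
    if PySem.Int.mod total 10 ≠ 0 then "INVALID"
    else
      let fnum := PySem.List.pyGetD digits (-1) 0
      let snum := PySem.List.pyGetD digits (-2) 0
      if fnum = 4 then "VISA"
      else if fnum = 5 ∧ (0 < snum ∧ snum < 6) then "MASTERCARD"
      else if fnum = 3 ∧ (snum = 4 ∨ snum = 7) then "AMEX"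
      else "INVALID"

-- ===== PRECONDITION & SPEC =====
def Spec_cardType (n : Int) (out : String) : Prop := out = cardType_alt n
instance (n : Int) (out : String) : Decidable (Spec_cardType n out) := by unfold Spec_cardType; infer_instance

-- ===== CLAIM (what is proved, stated in full; the proofs are below) =====
def Claim_equal_cardType : Prop := ∀ (n : Int), Dom_cardType n → Spec_cardType n (cardType n)

-- ===== LEMMAS AND PROOFS =====

lemma fd10 (a : Int) : PySem.Int.floordiv a 10 = a / 10 :=
  PySem.Int.floordiv_eq_ediv_of_pos (by norm_num)

lemma md10 (a : Int) : PySem.Int.mod a 10 = a % 10 :=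
  PySem.Int.mod_eq_emod_of_pos (by norm_num)

-- proof-land digit list (what pvDigits appends)
def dSpec (n : Int) : List Int :=
  if 0 < n then n % 10 :: dSpec (n / 10) else []
termination_by n.toNat
decreasing_by omega

-- proof-land leading digit
def leadD (n : Int) : Int :=
  if n < 10 then n else leadD (n / 10)
termination_by n.toNat
decreasing_by omega

-- proof-land variant of pvShorten that stops strictly below 100
def sh2 (n : Int) : Int :=
  if n < 100 then n else sh2 (n / 10)
termination_by n.toNat
decreasing_by omega

-- alternating Luhn sum over a LSB-first digit list
def altSum (b : Bool) : List Int → Int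
  | [] => 0
  | d :: rest => (if b then d * 2 / 10 + d * 2 % 10 else d) + altSum (!b) rest

-- structureless value of A's luhn loop
def luhnV (n : Int) : Int :=
  if 1 < n then
    n % 10 + (n / 10 % 10 * 2 / 10 + n / 10 % 10 * 2 % 10) + luhnV (n / 10 / 10)
  else 0
termination_by n.toNat
decreasing_by omega

lemma pvLuhnAux_eq : ∀ (n s1 s2 : Int), pvLuhnAux n s1 s2 = s1 + s2 + luhnV n := by
  intro n s1 s2
  induction n, s1, s2 using pvLuhnAux.induct with
  | case1 n s1 s2 h m1 n1 m2 n2 d2 d1 ih =>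
    simp only [fd10, md10, m1, n1, m2, n2, d2, d1] at ih
    rw [pvLuhnAux, luhnV, if_pos h, if_pos h]
    simp only [fd10, md10]
    rw [ih]; ring
  | case2 n s1 s2 h =>
    rw [pvLuhnAux, luhnV, if_neg h, if_neg h]; ring

lemma pvDigits_eq : ∀ (n : Int) (acc : List Int), pvDigits n acc = acc ++ dSpec n := by
  intro n acc
  induction n, acc using pvDigits.induct with
  | case1 n acc h ih =>
    rw [pvDigits, dSpec, if_pos h, if_pos h]
    simp only [fd10, md10] at *
    rw [ih]; simp
  | case2 n acc h =>
    rw [pvDigits, dSpec, if_neg h, if_neg h]; simp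

lemma foldl_step (ds : List Int) : ∀ (t : Int) (b : Bool),
    (ds.foldl pvLuhnStep (t, b)).1 = t + altSum b ds := by
  induction ds with
  | nil => intro t b; simp [altSum]
  | cons d rest ih =>
    intro t b
    simp only [List.foldl_cons, pvLuhnStep, altSum, fd10, md10]
    rw [ih]; ring

lemma leadD_step (n : Int) (h : 10 ≤ n) : leadD n = leadD (n / 10) := by
  rw [leadD, if_neg (by omega)]

lemma sh2_step (n : Int) (h : 100 ≤ n) : sh2 n = sh2 (n / 10) := by
  rw [sh2, if_neg (by omega)]

lemma leadD_small (n : Int) (h : n < 10) : leadD n = n := by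
  rw [leadD, if_pos h]

lemma leadD_bounds : ∀ (k : Nat) (n : Int), n.toNat ≤ k → 0 < n → 1 ≤ leadD n ∧ leadD n ≤ 9 := by
  intro k
  induction k with
  | zero => intro n hk hn; omega
  | succ k ih =>
    intro n hk hn
    by_cases h : n < 10
    · rw [leadD_small n h]; omega
    · rw [leadD_step n (by omega)]
      exact ih (n / 10) (by omega) (by omega)

lemma sh2_props : ∀ (k : Nat) (n : Int), n.toNat ≤ k → 10 ≤ n →
    10 ≤ sh2 n ∧ sh2 n ≤ 99 ∧ sh2 n / 10 = leadD n := by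
  intro k
  induction k with
  | zero => intro n hk hn; omega
  | succ k ih =>
    intro n hk hn
    by_cases h : n < 100
    · rw [sh2, if_pos h]
      refine ⟨hn, by omega, ?_⟩
      rw [leadD_step n hn, leadD_small (n / 10) (by omega)]
    · rw [sh2, if_neg h]
      obtain ⟨h1, h2, h3⟩ := ih (n / 10) (by omega) (by omega)
      exact ⟨h1, h2, by rw [h3, ← leadD_step n (by omega)]⟩

lemma shorten_cases : ∀ (k : Nat) (n : Int), n.toNat ≤ k → 10 ≤ n →
    pvShorten n = sh2 n ∨ (pvShorten n = 100 ∧ sh2 n = 10) := by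
  intro k
  induction k with
  | zero => intro n hk hn; omega
  | succ k ih =>
    intro n hk hn
    by_cases h : 100 < n
    · rw [pvShorten, if_pos h, fd10, sh2, if_neg (by omega)]
      exact ih (n / 10) (by omega) (by omega)
    · rw [pvShorten, if_neg h]
      by_cases h2 : n < 100
      · rw [sh2, if_pos h2]; left; rfl
      · have hn100 : n = 100 := by omega
        subst hn100
        right
        refine ⟨rfl, ?_⟩
        rw [sh2, if_neg (by norm_num)]
        norm_num
        rw [sh2, if_pos (by norm_num)]

lemma dSpec_split : ∀ (k : Nat) (n : Int), n.toNat ≤ k → 10 ≤ n →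
    ∃ pre : List Int, dSpec n = pre ++ [sh2 n % 10, leadD n] := by
  intro k
  induction k with
  | zero => intro n hk hn; omega
  | succ k ih =>
    intro n hk hn
    by_cases h : n < 100
    · refine ⟨[], ?_⟩
      rw [sh2, if_pos h, leadD_step n hn, leadD_small (n / 10) (by omega)]
      rw [dSpec, if_pos (by omega)]
      rw [dSpec, if_pos (by omega)]
      rw [dSpec, if_neg (by omega)]
      have e : n / 10 % 10 = n / 10 := by omega
      rw [e]
      simp
    · obtain ⟨pre, hp⟩ := ih (n / 10) (by omega) (by omega)
      refine ⟨n % 10 :: pre, ?_⟩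
      rw [dSpec, if_pos (by omega), hp, sh2_step n (by omega), leadD_step n (by omega)]
      simp

lemma luhn_eq : ∀ (k : Nat) (n : Int), n.toNat ≤ k → 1 ≤ n → 2 ≤ leadD n →
    luhnV n = altSum false (dSpec n) := by
  intro k
  induction k with
  | zero => intro n hk hn hl; omega
  | succ k ih =>
    intro n hk hn hl
    by_cases h9 : n < 10
    · have hlead : leadD n = n := leadD_small n h9
      have e : n / 10 = 0 := by omega
      rw [luhnV, if_pos (by omega), e]
      rw [dSpec, if_pos (by omega), dSpec, e]
      norm_num
      rw [luhnV, if_neg (by norm_num)]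
      simp [altSum]
    · by_cases h99 : n < 100
      · have e : n / 10 / 10 = 0 := by omega
        rw [luhnV, if_pos (by omega), e]
        rw [dSpec, if_pos (by omega)]
        rw [dSpec, if_pos (by omega), e]
        rw [dSpec, if_neg (by norm_num)]
        rw [luhnV, if_neg (by norm_num)]
        simp [altSum]
      · have e : n / 10 / 10 = n / 100 := by omega
        have hlead2 : leadD (n / 100) = leadD n := by
          rw [leadD_step n (by omega), leadD_step (n / 10) (by omega), e]
        rw [luhnV, if_pos (by omega), e]
        rw [dSpec, if_pos (by omega)]
        rw [dSpec, if_pos (by omega), e]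
        rw [ih (n / 100) (by omega) (by omega) (by omega)]
        simp [altSum]
        ring

-- ===== VERDICT (by name: the statement is the Claim_ definition above) =====
theorem cardType_spec : Claim_equal_cardType := by
  intro n _
  unfold Spec_cardType
  by_cases hn : n < 10
  · have hshort : pvShorten n = n := by rw [pvShorten, if_neg (by omega)]
    simp only [cardType, cardType_alt, fd10, md10, hshort]
    rw [if_pos hn]
    split_ifs <;> first | rfl | omega
  · have hn' : 10 ≤ n := by omega
    have hlb := leadD_bounds n.toNat n le_rfl (by omega)
    have hsp := sh2_props n.toNat n le_rfl hn'
    have hsc := shorten_cases n.toNat n le_rfl hn'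
    obtain ⟨pre, hpre⟩ := dSpec_split n.toNat n le_rfl hn'
    have hdig : pvDigits n [] = dSpec n := by rw [pvDigits_eq]; simp
    have hf : PySem.List.pyGetD (dSpec n) (-1) 0 = leadD n := by
      rw [hpre, show pre ++ [sh2 n % 10, leadD n] = (pre ++ [sh2 n % 10]) ++ [leadD n] by simp,
        PySem.List.pyGetD_neg_one_append_singleton]
    have hs : PySem.List.pyGetD (dSpec n) (-2) 0 = sh2 n % 10 := by
      rw [hpre]
      rw [PySem.List.pyGetD_neg_ofNat _ 2 0 (by norm_num) (by simp)]
      simp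
    have hluhn : pvLuhn n = luhnV n := by rw [pvLuhn, pvLuhnAux_eq]; ring
    by_cases hl3 : leadD n = 3 ∨ leadD n = 4 ∨ leadD n = 5
    · have hlv : luhnV n = altSum false (dSpec n) :=
        luhn_eq n.toNat n le_rfl (by omega) (by omega)
      have hshort : pvShorten n = sh2 n := by
        rcases hsc with h | ⟨h1, h2⟩
        · exact h
        · exfalso; omega
      simp only [cardType, cardType_alt, fd10, md10, hdig, hluhn, hlv, hshort, hsp.2.2]
      rw [if_neg (by omega : ¬ n < 10), foldl_step]
      split_ifs <;> first | rfl | omega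
    · rcases hsc with hA | ⟨hA, h10⟩ <;>
      · simp only [cardType, cardType_alt, fd10, md10, hdig, hA, hf, hs]
        rw [if_neg (by omega : ¬ n < 10), foldl_step]
        split_ifs <;> first | rfl | omega
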